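-- pv_equiv track=rewrite | github.com/san2stic/SignFlow | backend/app/ml/sign_segmentation.py | _labels_to_segments
-- ===== SOURCE A (Python) =====
-- LABEL_B = 0   # Beginning
--
-- LABEL_I = 1   # Inside
--
-- LABEL_E = 2   # End
--
-- LABEL_O = 3   # Outside / neutral
--
-- def _labels_to_segments(labels: list[int]) -> list[tuple[int, int]]:
--     """Convertit une liste de labels BIEO en liste de segments (start, end)."""
--     segments: list[tuple[int, int]] = []
--     in_sign = False
--     start = 0
--     for i, lbl in enumerate(labels):
--         if lbl in (LABEL_B, LABEL_I, LABEL_E) and not in_sign: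
--             start = i
--             in_sign = True
--         elif lbl == LABEL_O and in_sign:
--             segments.append((start, i - 1))
--             in_sign = False
--     if in_sign:
--         segments.append((start, len(labels) - 1))
--     return segments
-- ===== SOURCE B (Python) =====
-- LABEL_B = 0   # Beginning
-- LABEL_I = 1   # Inside
-- LABEL_E = 2   # End
-- LABEL_O = 3   # Outside / neutral
--
-- def _labels_to_segments(labels: list[int]) -> list[tuple[int, int]]:
--     """Convertit une liste de labels BIEO en liste de segments (start, end)."""
--     segments: list[tuple[int, int]] = []
--     n = len(labels)
--     i = 0
--     while i < n:
--         if labels[i] == LABEL_O: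
--             i += 1
--             continue
--         j = i
--         while j < n and labels[j] != LABEL_O:
--             j += 1
--         # run labels[i:j] contains no LABEL_O
--         start = next((k for k in range(i, j) if labels[k] in (LABEL_B, LABEL_I, LABEL_E)), None)
--         if start is not None:
--             segments.append((start, j - 1))
--         i = j
--     return segments
-- ===== Notes on version B (the rewrite author's own statement) =====
-- stated objective: alternative
-- what changed: Replaces the per-element in_sign/start state machine by a two-pointer run scanner: skip O's, scan each maximal non-O run at once, emit (first B/I/E index in the run, run end) if the run contains one.
import Mathlib
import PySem

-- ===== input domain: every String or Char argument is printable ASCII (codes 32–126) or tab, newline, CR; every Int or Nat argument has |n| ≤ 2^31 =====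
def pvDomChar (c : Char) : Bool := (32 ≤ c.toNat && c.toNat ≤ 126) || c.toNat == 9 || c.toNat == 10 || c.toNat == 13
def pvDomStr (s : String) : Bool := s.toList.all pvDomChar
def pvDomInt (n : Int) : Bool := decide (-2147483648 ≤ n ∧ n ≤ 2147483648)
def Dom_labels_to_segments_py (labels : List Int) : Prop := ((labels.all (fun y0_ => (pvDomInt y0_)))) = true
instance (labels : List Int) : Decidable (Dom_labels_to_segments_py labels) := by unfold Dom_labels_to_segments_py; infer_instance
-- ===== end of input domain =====

-- B replaces A's per-element in_sign state machine with a two-pointer scan over maximal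
-- non-O runs (objective: alternative decomposition, same asymptotic cost).

-- ===== PORT A =====
-- A's for-loop over enumerate(labels) with state (segments, in_sign, start); i is the
-- running Python index, the [] case performs the trailing 'if in_sign' append (i = len).
def aLoop (labels : List Int) (i : Int) (segments : List (Int × Int))
    (in_sign : Bool) (start : Int) : List (Int × Int) :=
  match labels with
  | [] => if in_sign then segments ++ [(start, i - 1)] else segments
  | lbl :: rest =>
    if (lbl = 0 ∨ lbl = 1 ∨ lbl = 2) ∧ in_sign = false then
      aLoop rest (i + 1) segments true i
    else if lbl = 3 ∧ in_sign = true then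
      aLoop rest (i + 1) (segments ++ [(start, i - 1)]) false start
    else
      aLoop rest (i + 1) segments in_sign start

def labels_to_segments_py (labels : List Int) : List (Int × Int) :=
  aLoop labels 0 [] false 0

-- ===== PORT B =====
-- the (index, label) pairs of the current run, indices starting at i
def enumFrom (i : Int) : List Int → List (Int × Int)
  | [] => []
  | l :: r => (i, l) :: enumFrom (i + 1) r

-- next((k for k in range(i, j) if labels[k] in (0,1,2)), None) over the run's pairs
def findStart : List (Int × Int) → Option Int
  | [] => none
  | (k, l) :: rest => if l = 0 ∨ l = 1 ∨ l = 2 then some k else findStart rest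

-- B's outer while-loop: i is the current index, the list argument is labels[i:];
-- the inner 'while j < n and labels[j] != 3' scan is the takeWhile/dropWhile split.
def bLoop : List Int → Int → List (Int × Int)
  | [], _ => []
  | l :: rest, i =>
    if l = 3 then bLoop rest (i + 1)
    else
      let g := (l :: rest).takeWhile (fun x => x ≠ 3)
      let r := (l :: rest).dropWhile (fun x => x ≠ 3)
      (match findStart (enumFrom i g) with
       | some s => [(s, i + (g.length : Int) - 1)]
       | none => []) ++ bLoop r (i + (g.length : Int))
termination_by labels _ => labels.length
decreasing_by
  · simp
  · simp only [List.dropWhile]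
    have h1 : (decide (l ≠ 3)) = true := by simp_all
    rw [h1]
    have := List.length_dropWhile_le (fun x => decide (x ≠ 3)) rest
    simp at this ⊢
    omega

def labels_to_segments_py_alt (labels : List Int) : List (Int × Int) :=
  bLoop labels 0

-- ===== PRECONDITION & SPEC =====
def Spec_labels_to_segments_py (labels : List Int) (out : List (Int × Int)) : Prop := out = labels_to_segments_py_alt labels
instance (labels : List Int) (out : List (Int × Int)) : Decidable (Spec_labels_to_segments_py labels out) := by unfold Spec_labels_to_segments_py; infer_instance

-- ===== CLAIM (what is proved, stated in full; the proofs are below) =====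
def Claim_equal_labels_to_segments_py : Prop := ∀ (labels : List Int), Dom_labels_to_segments_py labels → Spec_labels_to_segments_py labels (labels_to_segments_py labels)

-- ===== LEMMAS AND PROOFS =====

theorem bLoop_nil (i : Int) : bLoop [] i = [] := by
  rw [bLoop]

theorem bLoop_three (r : List Int) (i : Int) : bLoop (3 :: r) i = bLoop r (i + 1) := by
  rw [bLoop]; simp

theorem bLoop_cons (l : Int) (r : List Int) (i : Int) (h : l ≠ 3) :
    bLoop (l :: r) i =
      (match findStart (enumFrom i (l :: r.takeWhile (fun x => x ≠ 3))) with
       | some s => [(s, i + ((l :: r.takeWhile (fun x => x ≠ 3)).length : Int) - 1)]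
       | none => []) ++
      bLoop (r.dropWhile (fun x => x ≠ 3)) (i + ((l :: r.takeWhile (fun x => x ≠ 3)).length : Int)) := by
  rw [bLoop]
  simp [h]

theorem dropWhile_head3 (xs : List Int) (h t : _) (hx : xs.dropWhile (fun x => decide (x ≠ 3)) = h :: t) : h = 3 := by
  induction xs with
  | nil => simp at hx
  | cons a r ih =>
    by_cases ha : a = 3
    · rw [List.dropWhile_cons_of_neg (by simp [ha])] at hx
      injection hx with h1 h2
      omega
    · rw [List.dropWhile_cons_of_pos (by simp [ha])] at hx
      exact ih hx

-- joint invariant: A's loop from state in_sign=false produces B's run scan of the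
-- remaining suffix; from in_sign=true it closes the pending segment at the end of the
-- current non-O prefix and continues as B after it.
theorem aLoop_bLoop (labels : List Int) :
    (∀ i segs s, aLoop labels i segs false s = segs ++ bLoop labels i) ∧
    (∀ i segs s, aLoop labels i segs true s =
      segs ++ (s, i + ((labels.takeWhile (fun x => x ≠ 3)).length : Int) - 1) ::
        (match labels.dropWhile (fun x => x ≠ 3) with
         | [] => []
         | _ :: r => bLoop r (i + ((labels.takeWhile (fun x => x ≠ 3)).length : Int) + 1))) := by
  induction labels with
  | nil =>
    refine ⟨fun i segs s => ?_, fun i segs s => ?_⟩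
    · simp [aLoop, bLoop_nil]
    · simp [aLoop]
  | cons l rest ih =>
    obtain ⟨ihE, ihF⟩ := ih
    refine ⟨fun i segs s => ?_, fun i segs s => ?_⟩
    · -- in_sign = false
      by_cases h3 : l = 3
      · subst h3
        have ha : aLoop (3 :: rest) i segs false s = aLoop rest (i + 1) segs false s := by
          simp [aLoop]
        rw [ha, ihE, bLoop_three]
      · by_cases hb : l = 0 ∨ l = 1 ∨ l = 2
        · have ha : aLoop (l :: rest) i segs false s = aLoop rest (i + 1) segs true i := by
            simp [aLoop, hb]
          rw [ha, ihF, bLoop_cons l rest i h3]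
          have hf : findStart (enumFrom i (l :: rest.takeWhile (fun x => x ≠ 3))) = some i := by
            simp [enumFrom, findStart, hb]
          rw [hf]
          cases hd : rest.dropWhile (fun x => decide (x ≠ 3)) with
          | nil =>
            simp [bLoop_nil]
            omega
          | cons h t =>
            have h3' : h = 3 := dropWhile_head3 rest h t hd
            subst h3'
            simp [bLoop_three]
            refine ⟨by omega, ?_⟩
            congr 1
            omega
        · -- junk label: not BIE, not O
          have ha : aLoop (l :: rest) i segs false s = aLoop rest (i + 1) segs false s := by
            simp [aLoop, hb, h3]
          rw [ha, ihE, bLoop_cons l rest i h3]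
          have hf : findStart (enumFrom i (l :: rest.takeWhile (fun x => x ≠ 3)))
                  = findStart (enumFrom (i + 1) (rest.takeWhile (fun x => x ≠ 3))) := by
            simp [enumFrom, findStart, hb]
          rw [hf]
          cases rest with
          | nil => simp [findStart, enumFrom, bLoop_nil]
          | cons l' r' =>
            by_cases h3' : l' = 3
            · subst h3'
              simp [findStart, enumFrom, bLoop_three]
            · rw [bLoop_cons l' r' (i + 1) h3']
              simp [h3']
              cases hf2 : findStart (enumFrom (i + 1) (l' :: r'.takeWhile (fun x => !decide (x = 3)))) with
              | none =>
                simp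
                congr 1
                omega
              | some st =>
                simp
                refine ⟨by omega, ?_⟩
                congr 1
                omega
    · -- in_sign = true
      by_cases h3 : l = 3
      · subst h3
        have ha : aLoop (3 :: rest) i segs true s
                = aLoop rest (i + 1) (segs ++ [(s, i - 1)]) false s := by
          simp [aLoop]
        rw [ha, ihE]
        simp
      · have ha : aLoop (l :: rest) i segs true s = aLoop rest (i + 1) segs true s := by
          simp [aLoop, h3]
        rw [ha, ihF]
        simp [h3]
        refine ⟨by omega, ?_⟩
        cases hd : rest.dropWhile (fun x => !decide (x = 3)) with
        | nil => simp
        | cons h t =>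
          simp
          congr 1
          omega

-- ===== VERDICT (by name: the statement is the Claim_ definition above) =====
theorem labels_to_segments_py_spec : Claim_equal_labels_to_segments_py := by
  intro labels _
  unfold Spec_labels_to_segments_py labels_to_segments_py labels_to_segments_py_alt
  simpa using (aLoop_bLoop labels).1 0 [] 0
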